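-- pv_equiv track=rewrite | github.com/NovoDan/PythonLab | lab4/Lab4.py | _get_dict_words_sentences
-- ===== SOURCE A (Python) =====
-- def _get_dict_words_sentences(sentences_list):
--     working_dict = dict()  # key: amount of words in sentence, value: amount of sentences with this length
--     for i in range(len(sentences_list)):
--         words_amount = len(sentences_list[i].split(" "))
--         if words_amount not in working_dict:
--             working_dict[words_amount] = 1
--         else:
--             working_dict[words_amount] += 1
--     return working_dict
-- ===== SOURCE B (Python) =====
-- def _get_dict_words_sentences(sentences_list):
--     # two-phase: materialise per-sentence word counts, then one entry per distinct count
--     counts = [len(s.split(" ")) for s in sentences_list]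
--     return {c: counts.count(c) for c in dict.fromkeys(counts)}
-- ===== Notes on version B (the rewrite author's own statement) =====
-- stated objective: alternative
-- what changed: B first materialises the list of per-sentence word counts, then builds the dict in a second phase with one entry per distinct count via counts.count(c), instead of incrementally updating a dict inside an index loop.
import Mathlib
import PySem

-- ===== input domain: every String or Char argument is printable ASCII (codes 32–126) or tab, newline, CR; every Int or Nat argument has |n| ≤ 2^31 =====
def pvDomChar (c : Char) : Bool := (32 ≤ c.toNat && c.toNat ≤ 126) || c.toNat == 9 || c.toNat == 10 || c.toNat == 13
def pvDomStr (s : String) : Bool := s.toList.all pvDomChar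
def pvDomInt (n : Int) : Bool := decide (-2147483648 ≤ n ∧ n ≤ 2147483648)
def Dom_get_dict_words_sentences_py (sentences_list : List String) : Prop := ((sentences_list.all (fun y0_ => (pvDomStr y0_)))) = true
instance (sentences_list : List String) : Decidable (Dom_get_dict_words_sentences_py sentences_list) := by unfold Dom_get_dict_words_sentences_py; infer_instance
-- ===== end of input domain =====

-- B replaces A's index loop that increments a dict entry per sentence by a two-phase pass:
-- first materialise the per-sentence word-count list, then emit one dict entry per distinct count.

-- ===== PORT A =====
def get_dict_words_sentences_py (sentences_list : List String) : List (Int × Int) :=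
  let working_dict : PySem.Dict Int Int :=
    (PySem.List.pyRange 0 sentences_list.length 1).foldl (fun d i =>
      -- words_amount = len(sentences_list[i].split(" ")); Chars.splitOn is exact for the nonempty separator " "
      let words_amount : Int := (PySem.Chars.splitOn (PySem.List.pyGetD sentences_list i "").toList [' ']).length
      if d.contains words_amount = false then d.insert words_amount 1
      else d.insert words_amount (d.getD words_amount 0 + 1)) PySem.Dict.empty
  working_dict.items

-- ===== PORT B =====
def get_dict_words_sentences_py_alt (sentences_list : List String) : List (Int × Int) :=
  let counts : List Int := sentences_list.map (fun s => ((PySem.Chars.splitOn s.toList [' ']).length : Int))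
  -- {c: counts.count(c) for c in dict.fromkeys(counts)}; PySem.List.dedup = dict.fromkeys order
  (PySem.List.dedup counts).map (fun c => (c, (counts.count c : Int)))

-- ===== PRECONDITION & SPEC =====
def Spec_get_dict_words_sentences_py (sentences_list : List String) (out : List (Int × Int)) : Prop := out = get_dict_words_sentences_py_alt sentences_list
instance (sentences_list : List String) (out : List (Int × Int)) : Decidable (Spec_get_dict_words_sentences_py sentences_list out) := by unfold Spec_get_dict_words_sentences_py; infer_instance

-- ===== CLAIM (what is proved, stated in full; the proofs are below) =====
def Claim_equal_get_dict_words_sentences_py : Prop := ∀ (sentences_list : List String), Dom_get_dict_words_sentences_py sentences_list → Spec_get_dict_words_sentences_py sentences_list (get_dict_words_sentences_py sentences_list)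

-- ===== LEMMAS AND PROOFS =====

theorem get_dict_words_sentences_eq (xs : List String) :
    get_dict_words_sentences_py xs = get_dict_words_sentences_py_alt xs := by
  unfold get_dict_words_sentences_py get_dict_words_sentences_py_alt
  dsimp only
  rw [PySem.List.foldl_pyRange_zero_pyGetD' xs ""
      (fun (d : PySem.Dict Int Int) s =>
        if d.contains ((PySem.Chars.splitOn s.toList [' ']).length : Int) = false then
          d.insert ((PySem.Chars.splitOn s.toList [' ']).length : Int) 1
        else d.insert ((PySem.Chars.splitOn s.toList [' ']).length : Int)
          (d.getD ((PySem.Chars.splitOn s.toList [' ']).length : Int) 0 + 1)) PySem.Dict.empty]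
  rw [PySem.List.foldl_congr_mem (l := xs) (init := (PySem.Dict.empty : PySem.Dict Int Int))
      (f := fun (d : PySem.Dict Int Int) s =>
        if d.contains ((PySem.Chars.splitOn s.toList [' ']).length : Int) = false then
          d.insert ((PySem.Chars.splitOn s.toList [' ']).length : Int) 1
        else d.insert ((PySem.Chars.splitOn s.toList [' ']).length : Int)
          (d.getD ((PySem.Chars.splitOn s.toList [' ']).length : Int) 0 + 1))
      (g := fun (d : PySem.Dict Int Int) s =>
        d.insert ((PySem.Chars.splitOn s.toList [' ']).length : Int)
          (d.getD ((PySem.Chars.splitOn s.toList [' ']).length : Int) 0 + 1))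
      (by intro d s _
          dsimp only
          by_cases h : d.contains ((PySem.Chars.splitOn s.toList [' ']).length : Int) = false
          · rw [if_pos h, PySem.Dict.getD_of_not_contains d 0 h]
            norm_num
          · rw [if_neg h])]
  rw [← List.foldl_map (g := fun (d : PySem.Dict Int Int) c => d.insert c (d.getD c 0 + 1))
      (f := fun s => ((PySem.Chars.splitOn s.toList [' ']).length : Int)) (l := xs)]
  rw [PySem.Dict.foldl_insert_getD_add_one_eq_counter]
  rw [PySem.Dict.items_counter]
  simp [PySem.List.dedup_eq_ofList]

-- ===== VERDICT (by name: the statement is the Claim_ definition above) =====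
theorem get_dict_words_sentences_py_spec : Claim_equal_get_dict_words_sentences_py := by
  intro xs _
  unfold Spec_get_dict_words_sentences_py
  exact get_dict_words_sentences_eq xs
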